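-- pv_equiv track=rewrite | github.com/yujeonghyeop/progrramers | PCCP/PCCP1/alpha.py | solution
-- ===== SOURCE A (Python) =====
-- def solution(input_string):
--     check = {}
--     notanswer = []
--     answer = []
--     checkstring = list(set(input_string))
--     result = ""
--     for i in input_string:
--         if i not in check:
--             check[i] = 1
--         else:
--             check[i] += 1
--     for j in range(len(input_string)):
--         cnt = 1
--         point = j
--         while(point<len(input_string)-1):
--             if input_string[point] == input_string[point+1]:
--                 cnt += 1
--                 point +=1
--             else:
--                 break
--         if cnt == check[input_string[j]] or check[input_string[j]]<2:
--             notanswer.append(input_string[j])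
--     for k in checkstring:
--         if k not in notanswer:
--             answer.append(k)
--     if len(answer) == 0:
--         result += "N"
--     else:
--         result += ''.join(sorted(list(set(answer))))
--     return result
-- ===== SOURCE B (Python) =====
-- def solution(input_string):
--     # one pass: count maximal runs per character; answer = chars with >= 2 runs
--     runs = {}
--     prev = None
--     for ch in input_string:
--         if ch != prev:
--             runs[ch] = runs.get(ch, 0) + 1
--             prev = ch
--     ans = sorted(c for c in runs if runs[c] >= 2)
--     return ''.join(ans) if ans else "N"
-- ===== Notes on version B (the rewrite author's own statement) =====
-- stated objective: faster
-- what changed: A counts every character, then for each index rescans forward to measure its run and rebuilds an exclusion list before filtering the character set; B makes one pass that counts the maximal runs of each character (a character is in the result iff it has at least two runs) and sorts the qualifying characters.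
import Mathlib
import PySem

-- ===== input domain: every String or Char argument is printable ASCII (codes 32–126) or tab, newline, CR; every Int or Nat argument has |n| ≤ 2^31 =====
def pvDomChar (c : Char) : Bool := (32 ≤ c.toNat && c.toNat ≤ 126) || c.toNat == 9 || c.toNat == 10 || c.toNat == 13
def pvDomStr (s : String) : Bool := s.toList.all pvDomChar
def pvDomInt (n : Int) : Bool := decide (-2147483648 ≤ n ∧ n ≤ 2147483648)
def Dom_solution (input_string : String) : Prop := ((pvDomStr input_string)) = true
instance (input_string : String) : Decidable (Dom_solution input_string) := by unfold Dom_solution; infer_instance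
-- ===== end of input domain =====

-- B replaces A's per-index rescan of each run by a single pass that counts maximal runs per
-- character (a character is in the answer iff it heads at least two runs); objective: faster.

-- ===== PORT A =====

-- A's inner 'while' loop: advances while input_string[point] == input_string[point+1]
def whileLoop (l : List Char) (point : Nat) (cnt : Int) : Int :=
  if _h : point < l.length - 1 then
    if l.getD point default = l.getD (point + 1) default then
      whileLoop l (point + 1) (cnt + 1)
    else cnt
  else cnt
termination_by l.length - point
decreasing_by omega

def solution (input_string : String) : String :=
  let l := input_string.toList
  let check : PySem.Dict Char Int :=
    l.foldl (fun d i => if d.contains i = false then d.insert i 1 else d.modify i 0 (· + 1))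
      PySem.Dict.empty
  let checkstring : PySem.Set Char := PySem.Set.ofList l
  let notanswer : List Char :=
    (List.range l.length).foldl
      (fun na j =>
        let cnt := whileLoop l j 1
        if cnt = check.getD (l.getD j default) 0 ∨ check.getD (l.getD j default) 0 < 2 then
          na ++ [l.getD j default]
        else na) []
  let answer : List Char :=
    checkstring.foldl (fun a k => if k ∉ notanswer then a ++ [k] else a) []
  if answer.length = 0 then "N"
  else String.ofList (PySem.List.sorted (PySem.Set.ofList answer) (fun x => x) false)

-- ===== PORT B =====

def solution_alt (input_string : String) : String :=
  let st :=
    input_string.toList.foldl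
      (fun (st : PySem.Dict Char Int × Option Char) ch =>
        if some ch ≠ st.2 then (st.1.insert ch (st.1.getD ch 0 + 1), some ch) else st)
      (PySem.Dict.empty, none)
  let runs := st.1
  let ans := PySem.List.sorted (runs.keys.filter (fun c => 2 ≤ runs.getD c 0)) (fun x => x) false
  if ans = [] then "N" else String.ofList ans

-- ===== PRECONDITION & SPEC =====
def Spec_solution (input_string : String) (out : String) : Prop := out = solution_alt input_string
instance (input_string : String) (out : String) : Decidable (Spec_solution input_string out) := by unfold Spec_solution; infer_instance

-- ===== CLAIM (what is proved, stated in full; the proofs are below) =====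
def Claim_equal_solution : Prop := ∀ (input_string : String), Dom_solution input_string → Spec_solution input_string (solution input_string)

-- ===== LEMMAS AND PROOFS =====

def crl : List Char → Nat
  | [] => 0
  | [_] => 1
  | x :: y :: r => if x = y then crl (y :: r) + 1 else 1
def rle : List Char → List (Char × Nat)
  | [] => []
  | x :: xs =>
    match rle xs with
    | [] => [(x, 1)]
    | (y, k) :: r => if x = y then (x, k + 1) :: r else (x, 1) :: (y, k) :: r

theorem rle_cons_nil (x : Char) (xs : List Char) (h : rle xs = []) :
    rle (x :: xs) = [(x, 1)] := by simp [rle, h]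

theorem rle_cons_cons (x y : Char) (k : Nat) (r : List (Char × Nat)) (xs : List Char)
    (h : rle xs = (y, k) :: r) :
    rle (x :: xs) = if x = y then (x, k + 1) :: r else (x, 1) :: (y, k) :: r := by
  simp [rle, h]

theorem rle_nil_iff (l : List Char) : rle l = [] ↔ l = [] := by
  cases l with
  | nil => simp [rle]
  | cons x xs =>
    cases h : rle xs with
    | nil => simp [rle_cons_nil x xs h]
    | cons p r =>
      obtain ⟨y, k⟩ := p
      rw [rle_cons_cons x y k r xs h]
      split <;> simp

theorem rle_pos (l : List Char) : ∀ p ∈ rle l, 1 ≤ p.2 := by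
  induction l with
  | nil => simp [rle]
  | cons x xs ih =>
    cases h : rle xs with
    | nil => simp [rle_cons_nil x xs h]
    | cons p r =>
      obtain ⟨y, k⟩ := p
      rw [h] at ih
      rw [rle_cons_cons x y k r xs h]
      split <;> intro q hq
      · rcases List.mem_cons.1 hq with rfl | hq
        · simp
        · exact ih _ (List.mem_cons_of_mem _ hq)
      · rcases List.mem_cons.1 hq with rfl | hq
        · simp
        · exact ih _ hq

theorem rle_count (l : List Char) (c : Char) :
    l.count c = (((rle l).filter (fun p => p.1 = c)).map Prod.snd).sum := by
  induction l with
  | nil => simp [rle]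
  | cons x xs ih =>
    rw [List.count_cons]
    cases h : rle xs with
    | nil =>
      have hxs : xs = [] := (rle_nil_iff xs).1 h
      subst hxs
      rw [rle_cons_nil x [] rfl]
      by_cases hc : x = c <;> simp [hc]
    | cons p r =>
      obtain ⟨y, k⟩ := p
      rw [h] at ih
      rw [rle_cons_cons x y k r xs h]
      by_cases hxy : x = y
      · subst hxy
        by_cases hc : x = c
        · subst hc
          simp only [List.filter_cons, decide_eq_true_eq] at ih ⊢
          simp at ih ⊢
          omega
        · simp only [List.filter_cons, decide_eq_true_eq] at ih ⊢
          simp [hc] at ih ⊢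
          omega
      · rw [if_neg hxy]
        by_cases hc : x = c
        · subst hc
          simp only [List.filter_cons, decide_eq_true_eq] at ih ⊢
          simp at ih ⊢
          omega
        · simp only [List.filter_cons, decide_eq_true_eq] at ih ⊢
          simp [hc] at ih ⊢
          omega

theorem rle_head (l : List Char) (y : Char) (k : Nat) (r : List (Char × Nat))
    (h : rle l = (y, k) :: r) : crl l = k ∧ l.head? = some y := by
  induction l generalizing y k r with
  | nil => simp [rle] at h
  | cons x xs ih =>
    cases h2 : rle xs with
    | nil =>
      have hxs : xs = [] := (rle_nil_iff xs).1 h2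
      subst hxs
      rw [rle_cons_nil x [] rfl] at h
      simp at h
      obtain ⟨⟨rfl, rfl⟩, rfl⟩ := h
      simp [crl]
    | cons p r' =>
      obtain ⟨y', k'⟩ := p
      rw [rle_cons_cons x y' k' r' xs h2] at h
      have hxs := ih y' k' r' h2
      cases xs with
      | nil => simp [rle] at h2
      | cons z zs =>
        have hz : z = y' := by simpa using hxs.2
        by_cases hxy : x = y'
        · rw [if_pos hxy] at h
          simp at h
          obtain ⟨⟨rfl, rfl⟩, rfl⟩ := h
          refine ⟨?_, rfl⟩
          have hxz : x = z := by rw [hxy, hz]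
          simp [crl, hxz, hxs.1]
        · rw [if_neg hxy] at h
          simp at h
          obtain ⟨⟨rfl, rfl⟩, rfl⟩ := h
          refine ⟨?_, rfl⟩
          have hxz : x ≠ z := by rw [hz]; exact hxy
          simp [crl, hxz]

theorem rle_mono (x c : Char) (k : Nat) (xs : List Char) (h : (c, k) ∈ rle xs) :
    ∃ k', k ≤ k' ∧ (c, k') ∈ rle (x :: xs) := by
  cases h2 : rle xs with
  | nil => rw [h2] at h; simp at h
  | cons p r =>
    obtain ⟨y, k0⟩ := p
    rw [h2] at h
    rw [rle_cons_cons x y k0 r xs h2]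
    by_cases hxy : x = y
    · subst hxy
      rw [if_pos rfl]
      rcases List.mem_cons.1 h with hp | hp
      · simp only [Prod.mk.injEq] at hp
        obtain ⟨rfl, rfl⟩ := hp
        exact ⟨k + 1, by omega, List.mem_cons_self ..⟩
      · exact ⟨k, le_refl _, List.mem_cons_of_mem _ hp⟩
    · rw [if_neg hxy]
      exact ⟨k, le_refl _, List.mem_cons_of_mem _ h⟩

theorem mem_map_fst_rle (l : List Char) (c : Char) : c ∈ (rle l).map Prod.fst ↔ c ∈ l := by
  induction l with
  | nil => simp [rle]
  | cons x xs ih =>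
    cases h : rle xs with
    | nil =>
      have hxs : xs = [] := (rle_nil_iff xs).1 h
      subst hxs
      simp [rle_cons_nil x [] rfl]
    | cons p r =>
      obtain ⟨y, k⟩ := p
      rw [h] at ih
      rw [rle_cons_cons x y k r xs h]
      by_cases hxy : x = y
      · subst hxy
        rw [if_pos rfl]
        simp at ih ⊢
        tauto
      · rw [if_neg hxy]
        simp at ih ⊢
        tauto

theorem suffix_crl_fwd (l : List Char) (c : Char) (m : Nat)
    (h : ∃ t, t <:+ l ∧ t.head? = some c ∧ crl t = m) :
    ∃ k, (c, k) ∈ rle l ∧ 1 ≤ m ∧ m ≤ k := by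
  induction l with
  | nil =>
    obtain ⟨t, hs, hh, _⟩ := h
    have := List.suffix_nil.1 hs
    subst this; simp at hh
  | cons x xs ih =>
    obtain ⟨t, hs, hh, hm⟩ := h
    rcases List.suffix_cons_iff.1 hs with rfl | hs'
    · -- t = x :: xs
      cases hr : rle (x :: xs) with
      | nil => simp [(rle_nil_iff _).1 hr] at hh
      | cons p r =>
        obtain ⟨y, k⟩ := p
        obtain ⟨hcrl, hhead⟩ := rle_head _ y k r hr
        have hxc : x = c := by simpa using hh
        have hxy2 : x = y := by simpa using hhead
        have hk1 : 1 ≤ k := rle_pos (x :: xs) (y, k) (by rw [hr]; exact List.mem_cons_self ..)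
        refine ⟨k, ?_, by omega, by omega⟩
        subst hxc
        rw [← hxy2]
        exact List.mem_cons_self ..
    · obtain ⟨k, hk, h1, h2⟩ := ih ⟨t, hs', hh, hm⟩
      obtain ⟨k', hk'1, hk'2⟩ := rle_mono x c k xs hk
      exact ⟨k', hk'2, h1, by omega⟩

theorem suffix_crl_bwd (l : List Char) (c : Char) (m k : Nat)
    (hk : (c, k) ∈ rle l) (h1 : 1 ≤ m) (h2 : m ≤ k) :
    ∃ t, t <:+ l ∧ t.head? = some c ∧ crl t = m := by
  induction l generalizing k with
  | nil => simp [rle] at hk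
  | cons x xs ih =>
    cases h2' : rle xs with
    | nil =>
      have hxs : xs = [] := (rle_nil_iff xs).1 h2'
      subst hxs
      rw [rle_cons_nil x [] rfl] at hk
      simp at hk
      obtain ⟨rfl, rfl⟩ := hk
      exact ⟨[c], List.suffix_refl _, rfl, by simp [crl]; omega⟩
    | cons p r =>
      obtain ⟨y, k0⟩ := p
      rw [rle_cons_cons x y k0 r xs h2'] at hk
      by_cases hxy : x = y
      · rw [if_pos hxy] at hk
        rcases List.mem_cons.1 hk with hp | hp
        · simp only [Prod.mk.injEq] at hp
          obtain ⟨hcx, rfl⟩ := hp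
          subst hcx
          by_cases hm : m ≤ k0
          · obtain ⟨t, ht, hh, hc⟩ := ih k0 (by rw [h2', hxy]; exact List.mem_cons_self ..) hm
            exact ⟨t, ht.trans (List.suffix_cons c xs), hh, hc⟩
          · have hmk : m = k0 + 1 := by omega
            refine ⟨c :: xs, List.suffix_refl _, rfl, ?_⟩
            have := rle_head (c :: xs) c (k0 + 1) r
              (by rw [rle_cons_cons c y k0 r xs h2', if_pos hxy])
            rw [this.1, hmk]
        · obtain ⟨t, ht, hh, hc⟩ := ih k (by rw [h2']; exact List.mem_cons_of_mem _ hp) h2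
          exact ⟨t, ht.trans (List.suffix_cons x xs), hh, hc⟩
      · rw [if_neg hxy] at hk
        rcases List.mem_cons.1 hk with hp | hp
        · simp only [Prod.mk.injEq] at hp
          obtain ⟨hcx, rfl⟩ := hp
          subst hcx
          have hm1 : m = 1 := by omega
          refine ⟨c :: xs, List.suffix_refl _, rfl, ?_⟩
          have := rle_head (c :: xs) c 1 ((y, k0) :: r)
            (by rw [rle_cons_cons c y k0 r xs h2', if_neg hxy])
          rw [this.1, hm1]
        · obtain ⟨t, ht, hh, hc⟩ := ih k (by rw [h2']; exact hp) h2
          exact ⟨t, ht.trans (List.suffix_cons x xs), hh, hc⟩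

def hf (p : Option Char) : List Char → List Char
  | [] => []
  | x :: xs => if some x ≠ p then x :: hf (some x) xs else hf p xs

theorem hf_cons (p : Option Char) (x : Char) (xs : List Char) :
    hf p (x :: xs) = if some x ≠ p then x :: hf (some x) xs else hf p xs := rfl

theorem hf_some (l : List Char) : ∀ x : Char,
    hf (some x) l =
      if ((rle l).map Prod.fst).head? = some x then ((rle l).map Prod.fst).tail
      else (rle l).map Prod.fst := by
  induction l with
  | nil => intro x; simp [hf, rle]
  | cons z zs ih =>
    intro x
    cases h2 : rle zs with
    | nil =>
      have hzs : zs = [] := (rle_nil_iff zs).1 h2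
      subst hzs
      rw [rle_cons_nil z [] rfl]
      by_cases hzx : z = x
      · simp [hf, hzx]
      · simp [hf, hzx]
    | cons p r =>
      obtain ⟨y, k0⟩ := p
      rw [rle_cons_cons z y k0 r zs h2]
      have ihx := ih x
      have ihz := ih z
      rw [h2] at ihx ihz
      by_cases hzy : z = y
      · rw [if_pos hzy]
        by_cases hzx : z = x
        · subst hzx
          rw [hf_cons, if_neg (show ¬(some z ≠ some z) by simp)]
          simp at ihx ⊢
          rw [ihx]
          simp [← hzy]
        · rw [hf_cons, if_pos (show (some z ≠ some x) by simpa using hzx)]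
          simp at ihz ⊢
          rw [ihz]
          simp [← hzy, hzx]
      · rw [if_neg hzy]
        by_cases hzx : z = x
        · subst hzx
          rw [hf_cons, if_neg (show ¬(some z ≠ some z) by simp)]
          simp at ihx ⊢
          rw [ihx]
          simp
          intro h; exact absurd h.symm hzy
        · rw [hf_cons, if_pos (show (some z ≠ some x) by simpa using hzx)]
          simp at ihz ⊢
          rw [ihz]
          simp [hzx]
          intro h; exact absurd h.symm hzy

theorem hf_none (l : List Char) : hf none l = (rle l).map Prod.fst := by
  cases l with
  | nil => simp [hf, rle]
  | cons x xs =>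
    rw [hf_cons, if_pos (show (some x ≠ none) by simp), hf_some xs x]
    cases h2 : rle xs with
    | nil =>
      have hxs : xs = [] := (rle_nil_iff xs).1 h2
      subst hxs
      rw [rle_cons_nil x [] rfl]
      simp
    | cons p r =>
      obtain ⟨y, k0⟩ := p
      rw [rle_cons_cons x y k0 r xs h2]
      by_cases hxy : x = y
      · rw [if_pos hxy]; simp [hxy]
      · rw [if_neg hxy]; simp
        intro h; exact absurd h.symm hxy

theorem length_le_sum_snd (L : List (Char × Nat)) (h : ∀ p ∈ L, 1 ≤ p.2) :
    L.length ≤ (L.map Prod.snd).sum := by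
  induction L with
  | nil => simp
  | cons q L' ih =>
    have h1 := h q (List.mem_cons_self ..)
    have h2 := ih (fun p hp => h p (List.mem_cons_of_mem _ hp))
    simp only [List.length_cons, List.map_cons, List.sum_cons]
    omega

theorem mem_bound_sum_snd (L : List (Char × Nat)) (p : Char × Nat) (hp : p ∈ L)
    (h : ∀ q ∈ L, 1 ≤ q.2) : p.2 + (L.length - 1) ≤ (L.map Prod.snd).sum := by
  induction L with
  | nil => simp at hp
  | cons q L' ih =>
    rcases List.mem_cons.1 hp with rfl | hp'
    · have h2 := length_le_sum_snd L' (fun r hr => h r (List.mem_cons_of_mem _ hr))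
      simp only [List.length_cons, List.map_cons, List.sum_cons]
      omega
    · have h1 := h q (List.mem_cons_self ..)
      have h2 := ih hp' (fun r hr => h r (List.mem_cons_of_mem _ hr))
      simp only [List.length_cons, List.map_cons, List.sum_cons] at h2 ⊢
      omega

theorem mem_filter_rle_iff (l : List Char) (c : Char) :
    (rle l).filter (fun p => p.1 = c) ≠ [] ↔ c ∈ l := by
  rw [← mem_map_fst_rle]
  constructor
  · intro h
    obtain ⟨p, hp⟩ := List.exists_mem_of_ne_nil _ h
    have := List.mem_filter.1 hp
    simp at this
    exact this.2 ▸ List.mem_map_of_mem this.1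
  · intro h
    obtain ⟨p, hp, hfst⟩ := List.mem_map.1 h
    intro hnil
    have : p ∈ (rle l).filter (fun p => p.1 = c) := List.mem_filter.2 ⟨hp, by simp [hfst]⟩
    simp [hnil] at this

theorem core (l : List Char) (c : Char) (hc : c ∈ l) :
    (∃ t, t <:+ l ∧ t.head? = some c ∧ (crl t = l.count c ∨ l.count c < 2)) ↔
      ((rle l).filter (fun p => p.1 = c)).length ≤ 1 := by
  have hpos : ∀ p ∈ (rle l).filter (fun p => p.1 = c), 1 ≤ p.2 :=
    fun p hp => rle_pos l p (List.mem_filter.1 hp).1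
  have hsum := rle_count l c
  have hne : (rle l).filter (fun p => p.1 = c) ≠ [] := (mem_filter_rle_iff l c).2 hc
  have hlen1 : 1 ≤ ((rle l).filter (fun p => p.1 = c)).length :=
    List.length_pos_iff.2 hne
  constructor
  · rintro ⟨t, hsuf, hhead, hcond⟩
    rcases hcond with hcrl | hlt
    · obtain ⟨k, hk, h1, h2⟩ := suffix_crl_fwd l c (l.count c) ⟨t, hsuf, hhead, hcrl⟩
      have hkf : (c, k) ∈ (rle l).filter (fun p => p.1 = c) :=
        List.mem_filter.2 ⟨hk, by simp⟩
      have := mem_bound_sum_snd _ (c, k) hkf hpos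
      simp only at this
      omega
    · have := length_le_sum_snd _ hpos
      omega
  · intro hle
    have hlen : ((rle l).filter (fun p => p.1 = c)).length = 1 := by omega
    obtain ⟨p, hp⟩ := List.length_eq_one_iff.1 hlen
    have hpc : p.1 = c := by
      have : p ∈ (rle l).filter (fun q => q.1 = c) := by rw [hp]; exact List.mem_cons_self ..
      simpa using (List.mem_filter.1 this).2
    have hmem : p ∈ rle l := by
      have : p ∈ (rle l).filter (fun q => q.1 = c) := by rw [hp]; exact List.mem_cons_self ..
      exact (List.mem_filter.1 this).1
    have hcount : l.count c = p.2 := by rw [hsum, hp]; simp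
    have hp2 : 1 ≤ p.2 := rle_pos l p hmem
    by_cases h2 : l.count c < 2
    · obtain ⟨t, ht, hh, _⟩ := suffix_crl_bwd l c 1 p.2 (by rw [← hpc]; exact hmem) le_rfl hp2
      exact ⟨t, ht, hh, Or.inr h2⟩
    · obtain ⟨t, ht, hh, hcr⟩ := suffix_crl_bwd l c (l.count c) p.2
        (by rw [← hpc]; exact hmem) (by omega) (by omega)
      exact ⟨t, ht, hh, Or.inl hcr⟩

theorem whileLoop_eq (l : List Char) : ∀ (fuel j : Nat) (cnt : Int),
    l.length - j ≤ fuel → j < l.length →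
    whileLoop l j cnt = cnt + (crl (l.drop j) : Int) - 1 := by
  intro fuel
  induction fuel with
  | zero => intro j cnt hf hj; omega
  | succ n ih =>
    intro j cnt hf hj
    rw [whileLoop]
    have hdrop : l.drop j = l[j] :: l.drop (j + 1) := List.drop_eq_getElem_cons hj
    by_cases h : j < l.length - 1
    · rw [dif_pos h]
      have hj1 : j + 1 < l.length := by omega
      have hdrop2 : l.drop (j + 1) = l[j + 1] :: l.drop (j + 2) := List.drop_eq_getElem_cons hj1
      rw [List.getD_eq_getElem l default hj, List.getD_eq_getElem l default hj1]
      by_cases heq : l[j] = l[j + 1]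
      · rw [if_pos heq, ih (j + 1) (cnt + 1) (by omega) hj1]
        rw [hdrop, hdrop2, crl, if_pos heq]
        rw [← hdrop2]
        push_cast
        ring
      · rw [if_neg heq, hdrop, hdrop2, crl, if_neg heq]
        push_cast
        ring
    · rw [dif_neg h]
      have : l.drop (j + 1) = [] := by
        apply List.drop_eq_nil_of_le; omega
      rw [hdrop, this, crl]
      push_cast
      ring

theorem check_getD (l : List Char) (d : PySem.Dict Char Int) (c : Char) :
    (l.foldl (fun d i => if d.contains i = false then d.insert i 1 else d.modify i 0 (· + 1)) d).getD c 0
      = d.getD c 0 + (l.count c : Int) := by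
  induction l generalizing d with
  | nil => simp
  | cons x xs ih =>
    rw [List.foldl_cons, ih]
    have hstep : (if d.contains x = false then d.insert x 1 else d.modify x 0 (· + 1)).getD c 0
        = d.getD c 0 + if x = c then (1 : Int) else 0 := by
      by_cases hcon : d.contains x = false
      · rw [if_pos hcon, PySem.Dict.getD_insert]
        by_cases hcx : c = x
        · subst hcx
          rw [if_pos rfl, if_pos rfl, PySem.Dict.getD_of_not_contains d 0 hcon]
          omega
        · rw [if_neg hcx, if_neg (fun h => hcx h.symm), add_zero]
      · rw [if_neg hcon, PySem.Dict.getD_modify]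
        by_cases hcx : c = x
        · subst hcx; rw [if_pos rfl, if_pos rfl]
        · rw [if_neg hcx, if_neg (fun h => hcx h.symm), add_zero]
    rw [hstep, List.count_cons]
    by_cases hcx : x = c
    · rw [if_pos hcx, if_pos (by simp [hcx])]
      push_cast
      ring
    · rw [if_neg hcx, if_neg (by simp [hcx])]
      push_cast
      ring

theorem mem_keys_insert (d : PySem.Dict Char Int) (k : Char) (v : Int) (c : Char) :
    c ∈ (d.insert k v).keys ↔ c ∈ d.keys ∨ c = k := by
  by_cases hcon : d.contains k
  · rw [PySem.Dict.keys_insert_of_contains d v hcon]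
    constructor
    · exact Or.inl
    · rintro (h | rfl)
      · exact h
      · exact (PySem.Dict.contains_iff_mem_keys d c).1 hcon
  · rw [PySem.Dict.keys_insert_of_not_contains d v (by simpa using hcon)]
    simp

theorem nodup_keys_insert (d : PySem.Dict Char Int) (k : Char) (v : Int)
    (h : d.keys.Nodup) : (d.insert k v).keys.Nodup := by
  by_cases hcon : d.contains k
  · rw [PySem.Dict.keys_insert_of_contains d v hcon]; exact h
  · rw [PySem.Dict.keys_insert_of_not_contains d v (by simpa using hcon)]
    have hk : k ∉ d.keys := fun hm => hcon ((PySem.Dict.contains_iff_mem_keys d k).2 hm)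
    simp [List.nodup_append, h]
    exact fun a ha hak => hk (hak ▸ ha)

theorem bfold_getD (l : List Char) (d : PySem.Dict Char Int) (p : Option Char) (c : Char) :
    ((l.foldl
        (fun (st : PySem.Dict Char Int × Option Char) ch =>
          if some ch ≠ st.2 then (st.1.insert ch (st.1.getD ch 0 + 1), some ch) else st)
        (d, p)).1).getD c 0 = d.getD c 0 + ((hf p l).count c : Int) := by
  induction l generalizing d p with
  | nil => simp [hf]
  | cons x xs ih =>
    rw [List.foldl_cons, hf_cons]
    by_cases hxp : some x ≠ p
    · rw [if_pos hxp, if_pos hxp, ih, PySem.Dict.getD_insert, List.count_cons]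
      by_cases hcx : c = x
      · subst hcx
        rw [if_pos rfl, if_pos (by simp)]
        push_cast
        ring
      · rw [if_neg hcx, if_neg (by simp; exact fun h => hcx h.symm)]
        push_cast
        ring
    · rw [if_neg hxp, if_neg hxp, ih]

theorem bfold_keys_mem (l : List Char) (d : PySem.Dict Char Int) (p : Option Char) (c : Char) :
    c ∈ ((l.foldl
        (fun (st : PySem.Dict Char Int × Option Char) ch =>
          if some ch ≠ st.2 then (st.1.insert ch (st.1.getD ch 0 + 1), some ch) else st)
        (d, p)).1).keys ↔ c ∈ d.keys ∨ c ∈ hf p l := by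
  induction l generalizing d p with
  | nil => simp [hf]
  | cons x xs ih =>
    rw [List.foldl_cons, hf_cons]
    by_cases hxp : some x ≠ p
    · rw [if_pos hxp, if_pos hxp, ih]
      rw [mem_keys_insert]
      simp
      tauto
    · rw [if_neg hxp, if_neg hxp, ih]

theorem bfold_keys_nodup (l : List Char) (d : PySem.Dict Char Int) (p : Option Char)
    (h : d.keys.Nodup) :
    ((l.foldl
        (fun (st : PySem.Dict Char Int × Option Char) ch =>
          if some ch ≠ st.2 then (st.1.insert ch (st.1.getD ch 0 + 1), some ch) else st)
        (d, p)).1).keys.Nodup := by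
  induction l generalizing d p with
  | nil => exact h
  | cons x xs ih =>
    rw [List.foldl_cons]
    by_cases hxp : some x ≠ p
    · rw [if_pos hxp]
      exact ih _ _ (nodup_keys_insert _ _ _ h)
    · rw [if_neg hxp]
      exact ih _ _ h

theorem count_map_fst (R : List (Char × Nat)) (c : Char) :
    List.count c (List.map Prod.fst R) = (R.filter (fun p => p.1 = c)).length := by
  rw [List.count_eq_countP, List.countP_map, ← List.countP_eq_length_filter]
  apply List.countP_congr
  intro p _
  simp only [Function.comp_apply, beq_iff_eq, decide_eq_true_eq]

theorem idx_suffix (l : List Char) (c : Char) (R : Nat → Prop) :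
    (∃ j, j < l.length ∧ (l.getD j default = c ∧ R (crl (l.drop j)))) ↔
      (∃ t, t <:+ l ∧ t.head? = some c ∧ R (crl t)) := by
  constructor
  · rintro ⟨j, hj, hc, hR⟩
    refine ⟨l.drop j, List.drop_suffix j l, ?_, hR⟩
    rw [List.head?_drop]
    rw [List.getD_eq_getElem l default hj] at hc
    simp [List.getElem?_eq_getElem hj, hc]
  · rintro ⟨t, hsuf, hhead, hR⟩
    have htne : t ≠ [] := by rintro rfl; simp at hhead
    have hlen : t.length ≤ l.length := hsuf.length_le
    have htpos : 0 < t.length := List.length_pos_iff.2 htne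
    have hdrop : t = l.drop (l.length - t.length) := List.suffix_iff_eq_drop.1 hsuf
    refine ⟨l.length - t.length, by omega, ?_, by rw [← hdrop]; exact hR⟩
    have hj : l.length - t.length < l.length := by omega
    rw [List.getD_eq_getElem l default hj]
    rw [hdrop, List.head?_drop, List.getElem?_eq_getElem hj] at hhead
    simpa using hhead

theorem solution_eq (s : String) : solution s = solution_alt s := by
  unfold solution solution_alt
  set l := s.toList with hl
  -- abbreviations
  set flLen : Char → Nat := fun c => ((rle l).filter (fun p => p.1 = c)).length with hflLen
  -- A side: rewrite counter
  simp only [check_getD, PySem.Dict.getD_empty, zero_add]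
  -- A side: rewrite the index loop body pointwise on the range
  rw [PySem.List.foldl_congr_mem (List.range l.length) _
    (fun na j =>
      if crl (l.drop j) = l.count (l.getD j default) ∨ l.count (l.getD j default) < 2 then
        na ++ [l.getD j default] else na) []
    (by
      intro na j hj
      have hjlt : j < l.length := List.mem_range.1 hj
      have hw : whileLoop l j 1 = 1 + (crl (l.drop j) : Int) - 1 :=
        whileLoop_eq l (l.length - j) j 1 (le_refl _) hjlt
      refine if_congr ?_ rfl rfl
      rw [hw]
      omega)]
  set na : List Char :=
    List.foldl
      (fun na j =>
        if crl (l.drop j) = l.count (l.getD j default) ∨ l.count (l.getD j default) < 2 then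
          na ++ [l.getD j default]
        else na) [] (List.range l.length) with hna
  have hnac : ∀ c, c ∈ na ↔
      ∃ t, t <:+ l ∧ t.head? = some c ∧ (crl t = l.count c ∨ l.count c < 2) := by
    intro c
    rw [hna, PySem.List.foldl_append_ite
      (fun j => crl (l.drop j) = l.count (l.getD j default) ∨ l.count (l.getD j default) < 2)
      (fun j => l.getD j default)]
    simp only [List.nil_append, List.mem_map, List.mem_filter, List.mem_range, decide_eq_true_eq]
    constructor
    · rintro ⟨j, ⟨hjr, hcond⟩, rfl⟩
      exact (idx_suffix l (l.getD j default)
        (fun m => m = l.count (l.getD j default) ∨ l.count (l.getD j default) < 2)).1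
        ⟨j, hjr, rfl, hcond⟩
    · rintro ⟨t, hsuf, hh, hcond⟩
      obtain ⟨j, hj, hc, hR⟩ :=
        (idx_suffix l c (fun m => m = l.count c ∨ l.count c < 2)).2 ⟨t, hsuf, hh, hcond⟩
      exact ⟨j, ⟨hj, by rw [hc]; exact hR⟩, hc⟩
  have hkey : ∀ c, c ∈ l → (c ∉ na ↔ 2 ≤ flLen c) := by
    intro c hc
    rw [hnac c, core l c hc, hflLen]
    simp only []
    omega
  rw [PySem.List.foldl_append_ite (fun k => k ∉ na) (fun k => k)]
  rw [List.nil_append, List.map_id']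
  rw [List.filter_congr (l := PySem.Set.ofList l)
    (q := fun c => decide (2 ≤ flLen c))
    (fun k hk => decide_eq_decide.2 (hkey k ((PySem.Set.mem_ofList l k).1 hk)))]
  set good : List Char := (PySem.Set.ofList l).filter (fun c => decide (2 ≤ flLen c)) with hgood
  -- B side
  simp only [bfold_getD, PySem.Dict.getD_empty, zero_add, hf_none]
  set runsKeys : List Char :=
    (List.foldl
      (fun (st : PySem.Dict Char Int × Option Char) ch =>
        if some ch ≠ st.2 then (st.1.insert ch (st.1.getD ch 0 + 1), some ch) else st)
      (PySem.Dict.empty, none) l).1.keys with hrk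
  rw [List.filter_congr (l := runsKeys)
    (q := fun c => decide (2 ≤ flLen c))
    (fun c _ => decide_eq_decide.2 (by
      have hcc : List.count c (List.map Prod.fst (rle l)) = flLen c := by
        rw [hflLen]; exact count_map_fst (rle l) c
      rw [← hcc]
      omega))]
  have hkeysmem : ∀ c, c ∈ runsKeys ↔ c ∈ l := by
    intro c
    rw [hrk, bfold_keys_mem]
    simp only [PySem.Dict.keys_empty, List.not_mem_nil, false_or]
    rw [hf_none, mem_map_fst_rle]
  have hnodupB : runsKeys.Nodup := by
    rw [hrk]
    exact bfold_keys_nodup l _ none (by simp [PySem.Dict.keys_empty])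
  have hnodupGood : good.Nodup := (PySem.Set.nodup_ofList l).filter _
  have hperm : (runsKeys.filter (fun c => decide (2 ≤ flLen c))).Perm good := by
    refine (List.perm_ext_iff_of_nodup (hnodupB.filter _) hnodupGood).2 ?_
    intro a
    rw [hgood]
    simp only [List.mem_filter, hkeysmem, PySem.Set.mem_ofList]
  rw [PySem.List.sorted_eq_sorted_of_perm _ _ _ (fun a b h => h) hperm]
  rw [PySem.Set.ofList_eq_self_of_nodup good hnodupGood]
  by_cases hg : good = []
  · rw [hg]
    have hsn : (PySem.List.sorted ([] : List Char) (fun x => x) false) = [] :=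
      (PySem.List.sorted_eq_nil_iff _ _ _).2 rfl
    simp [hsn]
  · rw [if_neg (by simp [List.length_eq_zero_iff, hg]),
      if_neg (fun h => hg ((PySem.List.sorted_eq_nil_iff good (fun x => x) false).1 h))]


-- ===== VERDICT (by name: the statement is the Claim_ definition above) =====
theorem solution_spec : Claim_equal_solution := by
  intro s _
  unfold Spec_solution
  exact solution_eq s
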